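-- pv_equiv track=rewrite | github.com/TBarmak/anki-lingo | api/utils/format_csv.py | restructure_scraped_dict
-- ===== SOURCE A (Python) =====
-- def restructure_scraped_dict(scraped_word_data: list[dict], fields: list[str]):
--     '''
--     Restructures the list of entries to be grouped by word and/or part of speech, depending on which are included in the fields
--
--     Parameters
--     ------------
--         scraped_word_data: list[dict]
--             a list of dicts representing entries for the word. The entries contain fields such as word, part of speech (pos), definition, translations, etc.
--         fields: list[str]
--             a list of the fields to include. These fields correspond to the keys in the scraped_word_data dict
--
--     Return
--     ------------
--         restructured_dict: dict
--             a dict where the keys are the word/pos, and the values are the entries for that word/pos combination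
--     '''
--     restructure_key = [key for key in ['word', 'pos'] if key in fields]
--     restructured_dict = {}
--     for item in scraped_word_data:
--         item_key = " ".join([item.get(key, "")
--                             for key in restructure_key]).strip()
--         if restructured_dict.get(item_key):
--             restructured_dict[item_key].append(item)
--         else:
--             restructured_dict[item_key] = [item]
--     return restructured_dict
-- ===== SOURCE B (Python) =====
-- def restructure_scraped_dict(scraped_word_data: list[dict], fields: list[str]):
--     """Two-pass regrouping: tag each entry with its key string, then build the
--     dict by one comprehension over the first-occurrence-deduplicated keys."""
--     keys = [k for k in ('word', 'pos') if k in fields]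
--     tagged = [(" ".join(item.get(k, "") for k in keys).strip(), item)
--               for item in scraped_word_data]
--     return {k: [it for kk, it in tagged if kk == k]
--             for k in dict.fromkeys(kk for kk, _ in tagged)}
-- ===== Notes on version B (the rewrite author's own statement) =====
-- stated objective: alternative
-- what changed: Replaces A's incremental dict lookup/append loop with two passes: tag every item with its key string, then build the result in one comprehension over the first-occurrence-deduplicated key list, scanning the tagged pairs once per distinct key.
import Mathlib
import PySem

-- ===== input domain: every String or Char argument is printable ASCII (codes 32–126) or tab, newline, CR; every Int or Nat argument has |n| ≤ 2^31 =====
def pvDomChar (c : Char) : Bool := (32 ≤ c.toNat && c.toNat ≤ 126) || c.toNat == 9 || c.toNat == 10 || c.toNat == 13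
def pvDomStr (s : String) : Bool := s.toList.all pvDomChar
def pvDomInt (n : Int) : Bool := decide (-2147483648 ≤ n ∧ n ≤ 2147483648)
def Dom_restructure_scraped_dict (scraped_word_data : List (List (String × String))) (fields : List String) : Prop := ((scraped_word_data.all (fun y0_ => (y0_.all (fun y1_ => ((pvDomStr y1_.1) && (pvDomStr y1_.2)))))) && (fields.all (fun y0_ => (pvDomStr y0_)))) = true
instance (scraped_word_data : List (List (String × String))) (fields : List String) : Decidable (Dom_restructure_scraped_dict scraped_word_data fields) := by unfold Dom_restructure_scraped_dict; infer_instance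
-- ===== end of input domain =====

-- B regroups in two passes (tag each item with its key, dedup the keys, one comprehension
-- per distinct key) instead of A's incremental dict-append loop; objective: alternative.

-- key of one item: " ".join(item.get(key, "") for key in restructure_key).strip()
def pvItemKey (restructure_key : List String) (item : List (String × String)) : String :=
  PySem.Str.strip (PySem.Str.join " " (restructure_key.map (fun key => (PySem.Dict.mk item).getD key "")))

-- ===== PORT A =====
-- Python's truthiness test `if restructured_dict.get(item_key):` is false exactly when the
-- key is absent (None) or its value is []; both are `(d.getD item_key []) = []` here.
def restructure_scraped_dict (scraped_word_data : List (List (String × String))) (fields : List String) : List (String × List (List (String × String))) :=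
  let restructure_key := (["word", "pos"]).filter (fun key => fields.contains key)
  let restructured_dict := scraped_word_data.foldl (fun d item =>
      let item_key := pvItemKey restructure_key item
      if (d.getD item_key []) ≠ [] then
        d.modify item_key [] (fun l => l ++ [item])      -- restructured_dict[item_key].append(item)
      else
        d.insert item_key [item])
    PySem.Dict.empty
  restructured_dict.items

-- ===== PORT B =====
def restructure_scraped_dict_alt (scraped_word_data : List (List (String × String))) (fields : List String) : List (String × List (List (String × String))) :=
  let keys := (["word", "pos"]).filter (fun k => fields.contains k)
  let tagged := scraped_word_data.map (fun item => (pvItemKey keys item, item))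
  (PySem.List.dedup (tagged.map (·.1))).map
    (fun k => (k, (tagged.filter (fun p => p.1 == k)).map (·.2)))

-- ===== PRECONDITION & SPEC =====
def Spec_restructure_scraped_dict (scraped_word_data : List (List (String × String))) (fields : List String) (out : List (String × List (List (String × String)))) : Prop := out = restructure_scraped_dict_alt scraped_word_data fields
instance (scraped_word_data : List (List (String × String))) (fields : List String) (out : List (String × List (List (String × String)))) : Decidable (Spec_restructure_scraped_dict scraped_word_data fields out) := by unfold Spec_restructure_scraped_dict; infer_instance

-- ===== CLAIM (what is proved, stated in full; the proofs are below) =====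
def Claim_equal_restructure_scraped_dict : Prop := ∀ (scraped_word_data : List (List (String × String))) (fields : List String), Dom_restructure_scraped_dict scraped_word_data fields → Spec_restructure_scraped_dict scraped_word_data fields (restructure_scraped_dict scraped_word_data fields)

-- ===== LEMMAS AND PROOFS =====

-- A's loop body is exactly `d.modify item_key [] (· ++ [item])` in both branches:
-- when the looked-up list is empty, modify inserts [] ++ [item] = [item].
lemma pvStep_eq_modify (d : PySem.Dict String (List (List (String × String))))
    (k : String) (item : List (String × String)) :
    (if (d.getD k []) ≠ [] then d.modify k [] (fun l => l ++ [item]) else d.insert k [item])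
      = d.modify k [] (fun l => l ++ [item]) := by
  split_ifs with h
  · rfl
  · simp only [ne_eq, not_not] at h
    simp [PySem.Dict.modify, h]

-- ===== VERDICT (by name: the statement is the Claim_ definition above) =====
theorem restructure_scraped_dict_spec : Claim_equal_restructure_scraped_dict := by
  intro swd fields _
  show restructure_scraped_dict swd fields = restructure_scraped_dict_alt swd fields
  unfold restructure_scraped_dict restructure_scraped_dict_alt
  simp only [pvStep_eq_modify]
  set key := pvItemKey ((["word", "pos"]).filter (fun k => fields.contains k)) with hkey
  -- turn the loop over items into a loop over (key, item) pairs
  have hfold : swd.foldl (fun d item => d.modify (key item) [] (fun l => l ++ [item]))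
      PySem.Dict.empty
      = (swd.map (fun item => (key item, item))).foldl
          (fun d p => d.modify p.1 [] (fun l => l ++ [p.2])) PySem.Dict.empty := by
    rw [List.foldl_map]
  rw [hfold]
  set tagged := swd.map (fun item => (key item, item)) with htagged
  have hnd : ((tagged.foldl (fun d p => d.modify p.1 [] (fun l => l ++ [p.2]))
      PySem.Dict.empty)).keys.Nodup := by
    exact PySem.Dict.nodup_keys_foldl_modify_key tagged (fun p => p.1) []
      (fun d p => fun l => l ++ [p.2]) PySem.Dict.empty (by simp)
  rw [PySem.Dict.items_eq_map_keys _ hnd []]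
  have hkeys : ((tagged.foldl (fun d p => d.modify p.1 [] (fun l => l ++ [p.2]))
      PySem.Dict.empty)).keys = PySem.List.dedup (tagged.map (·.1)) := by
    rw [PySem.Dict.keys_foldl_modify_key tagged (fun p => p.1) []
      (fun d p => fun l => l ++ [p.2]) PySem.Dict.empty]
    simp [PySem.Set.update_nil_left]
  rw [hkeys]
  refine List.map_congr_left (fun k hk => ?_)
  rw [PySem.Dict.getD_foldl_modify_append]
  simp
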